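-- pv_equiv track=rewrite | github.com/kimt33/fanpy | wfns/upgrades/temp/sign.py | sign_excite_two
-- ===== SOURCE A (Python) =====
-- def sign_excite_two(occ_indices, vir_indices):
--     num_occ = len(occ_indices)
--
--     bins = [[] for j in range(num_occ + 1)]
--     # assume occ_indices is ordered
--     # assume vir_indices is ordered
--     counter = 0
--     for a in vir_indices:
--         while counter < num_occ and a > occ_indices[counter]:
--             counter += 1
--         bins[counter].append(a)
--
--     output = []
--     for i1 in range(num_occ):
--         for i2 in range(i1 + 1, num_occ):
--             # i2 -= i1 - 1
--             # i1 and i2 are the positions in the occ_indices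
--             for j1 in range(num_occ + 1):
--                 # j is the position of the spaces beween occ_indices
--                 # 0 is the space before index 0
--                 # 1 is the space between indices 0 and 1,
--                 # n is the space after n-1
--
--                 if not bins[j1]:
--                     continue
--
--                 # when j1 == j2
--                 num_jumps = i1 + i2 - 1 + 2 * j1
--                 # num_jumps -= 2 * sum([j1 > i1, j1 > i2])
--                 # sign resulting from creations where j1 == j2
--                 if num_jumps % 2 == 0:
--                     sign_j1 = 1
--                 else:
--                     sign_j1 = -1
--
--                 signs_j2 = []
--                 for j2 in range(j1 + 1, num_occ + 1):
--                     if not bins[j2]: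
--                         continue
--
--                     num_jumps = i1 + i2 - 1 + j2 + j1
--                     num_jumps -= sum([j2 > i1, j2 > i2, j1 > i1, j1 > i2])
--
--                     if num_jumps % 2 == 0:
--                         sign = 1
--                     else:
--                         sign = -1
--
--                     signs_j2 += [sign] * len(bins[j2])
--
--                 for len_j1 in reversed(range(len(bins[j1]))):
--                     output += [sign_j1] * len_j1 + signs_j2
--
--     return output
-- ===== SOURCE B (Python) =====
-- def _emit(base, es, out):
--     # es: (count, parity-sign) per NONEMPTY gap, in increasing gap order.
--     if not es:
--         return
--     (cnt1, e1), rest = es[0], es[1:]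
--     signs_j2 = [base * e1 * e2 for cnt2, e2 in rest for _ in range(cnt2)]
--     for k in range(cnt1 - 1, -1, -1):
--         out += [base] * k
--         out += signs_j2
--     _emit(base, rest, out)
--
--
-- def sign_excite_two(occ_indices, vir_indices):
--     n = len(occ_indices)
--     # count virtuals per gap (no need to store them)
--     counts = [0] * (n + 1)
--     c = 0
--     for a in vir_indices:
--         while c < n and a > occ_indices[c]:
--             c += 1
--         counts[c] += 1
--     pairs = [(j, counts[j]) for j in range(n + 1) if counts[j]]
--     out = []
--     for i1 in range(n):
--         for i2 in range(i1 + 1, n):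
--             base = 1 if (i1 + i2) % 2 else -1
--             es = [(cnt, 1 if (j - (j > i1) - (j > i2)) % 2 == 0 else -1)
--                   for j, cnt in pairs]
--             _emit(base, es, out)
--     return out
-- ===== Notes on version B (the rewrite author's own statement) =====
-- stated objective: alternative
-- what changed: B stores only per-gap counts (not the virtual indices themselves), iterates the pair loop over the precomputed list of nonempty gaps instead of scanning all num_occ+1 bins for every (i1,i2), and obtains each two-gap sign as a product of per-gap parity signs instead of re-evaluating the jump-count formula for every pair of gaps.
import Mathlib
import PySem

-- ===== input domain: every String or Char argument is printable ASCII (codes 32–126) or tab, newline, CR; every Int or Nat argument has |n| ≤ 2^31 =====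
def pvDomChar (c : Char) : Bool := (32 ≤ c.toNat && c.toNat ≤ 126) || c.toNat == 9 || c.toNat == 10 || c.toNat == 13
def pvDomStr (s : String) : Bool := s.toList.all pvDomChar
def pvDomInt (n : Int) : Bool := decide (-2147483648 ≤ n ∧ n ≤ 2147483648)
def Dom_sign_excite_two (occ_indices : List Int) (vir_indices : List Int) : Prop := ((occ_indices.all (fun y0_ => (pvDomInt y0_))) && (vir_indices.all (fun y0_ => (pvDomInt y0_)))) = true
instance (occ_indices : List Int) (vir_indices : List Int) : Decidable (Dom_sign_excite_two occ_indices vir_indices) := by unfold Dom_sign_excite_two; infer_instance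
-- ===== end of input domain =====

-- B replaces A's scan over all num_occ+1 bins inside the pair loop by a precomputed
-- list of the nonempty bins' counts, and computes each pair sign as a product of
-- per-gap parity signs; objective: alternative (skips empty bins; when the output
-- itself dominates, the cost is the same).

-- ===== PORT A =====
-- the `while counter < num_occ and a > occ_indices[counter]` loop (shared verbatim by
-- A and B); the guard `c < n` with n = occ.length keeps getD in range, so it is exact
def advance (occ : List Int) (n : Nat) (a : Int) (c : Nat) : Nat :=
  if h : c < n ∧ occ.getD c 0 < a then advance occ n a (c + 1) else c
termination_by n - c
decreasing_by omega

-- `bins[counter].append(a)` over vir_indices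
def binsStep (occ : List Int) (n : Nat) (st : Nat × List (List Int)) (a : Int) :
    Nat × List (List Int) :=
  let c := advance occ n a st.1
  (c, st.2.modify c (fun b => b ++ [a]))

def sign_excite_two (occ_indices : List Int) (vir_indices : List Int) : List Int :=
  let num_occ := occ_indices.length
  let bins := (vir_indices.foldl (binsStep occ_indices num_occ)
      (0, List.replicate (num_occ + 1) ([] : List Int))).2
  (List.range num_occ).foldl (fun output (i1 : Nat) =>
    (List.range' (i1 + 1) (num_occ - (i1 + 1))).foldl (fun output (i2 : Nat) =>
      (List.range (num_occ + 1)).foldl (fun output j1 =>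
        if bins.getD j1 [] = [] then output
        else
          let num_jumps : Int := (i1 : Int) + (i2 : Int) - 1 + 2 * (j1 : Int)
          let sign_j1 : Int := if num_jumps % 2 = 0 then 1 else -1
          let signs_j2 := (List.range' (j1 + 1) (num_occ + 1 - (j1 + 1))).foldl (fun sj j2 =>
            if bins.getD j2 [] = [] then sj
            else
              let num_jumps : Int := (i1 : Int) + (i2 : Int) - 1 + (j2 : Int) + (j1 : Int) -
                ((if i1 < j2 then 1 else 0) + (if i2 < j2 then 1 else 0) +
                 (if i1 < j1 then 1 else 0) + (if i2 < j1 then 1 else 0))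
              let sign : Int := if num_jumps % 2 = 0 then 1 else -1
              sj ++ List.replicate (bins.getD j2 []).length sign) []
          (List.range (bins.getD j1 []).length).reverse.foldl (fun output len_j1 =>
            output ++ List.replicate len_j1 sign_j1 ++ signs_j2) output)
        output) output) []

-- ===== PORT B =====
-- `counts[c] += 1` over vir_indices (B counts, it does not store the virtuals)
def countStep (occ : List Int) (n : Nat) (st : Nat × List Nat) (a : Int) : Nat × List Nat :=
  let c := advance occ n a st.1
  (c, st.2.modify c (· + 1))

-- Source B's `_sign(x) = 1 if x % 2 == 0 else -1`
def signI (x : Int) : Int := if x % 2 = 0 then 1 else -1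

-- Source B's `_gap_sign(i1, i2, j) = _sign(j - (j > i1) - (j > i2))`
def gapSign (i1 i2 j : Nat) : Int :=
  signI ((j : Int) - (if i1 < j then 1 else 0) - (if i2 < j then 1 else 0))

-- Source B's recursive `_emit(base, es, out)`
def emit (base : Int) : List (Nat × Int) → List Int → List Int
  | [], out => out
  | (cnt1, e1) :: rest, out =>
    let signs_j2 := rest.flatMap (fun ce => List.replicate ce.1 (base * e1 * ce.2))
    emit base rest ((List.range cnt1).reverse.foldl
      (fun o k => o ++ List.replicate k base ++ signs_j2) out)

def sign_excite_two_alt (occ_indices : List Int) (vir_indices : List Int) : List Int :=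
  let n := occ_indices.length
  let counts := (vir_indices.foldl (countStep occ_indices n) (0, List.replicate (n + 1) 0)).2
  let pairs := (List.range (n + 1)).filterMap
    (fun j => if counts.getD j 0 ≠ 0 then some (j, counts.getD j 0) else none)
  (List.range n).foldl (fun out (i1 : Nat) =>
    (List.range' (i1 + 1) (n - (i1 + 1))).foldl (fun out (i2 : Nat) =>
      emit (signI ((i1 : Int) + (i2 : Int) - 1))
        (pairs.map (fun jc => (jc.2, gapSign i1 i2 jc.1))) out) out) []

-- ===== PRECONDITION & SPEC =====
def Spec_sign_excite_two (occ_indices : List Int) (vir_indices : List Int) (out : List Int) : Prop := out = sign_excite_two_alt occ_indices vir_indices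
instance (occ_indices : List Int) (vir_indices : List Int) (out : List Int) : Decidable (Spec_sign_excite_two occ_indices vir_indices out) := by unfold Spec_sign_excite_two; infer_instance

-- ===== CLAIM (what is proved, stated in full; the proofs are below) =====
def Claim_equal_sign_excite_two : Prop := ∀ (occ_indices : List Int) (vir_indices : List Int), Dom_sign_excite_two occ_indices vir_indices → Spec_sign_excite_two occ_indices vir_indices (sign_excite_two occ_indices vir_indices)

-- ===== LEMMAS AND PROOFS =====

theorem map_length_modify (l : List (List Int)) (i : Nat) (a : Int) :
    (l.modify i (fun b => b ++ [a])).map List.length = (l.map List.length).modify i (· + 1) := by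
  induction l generalizing i with
  | nil => simp
  | cons hd tl ih =>
    cases i with
    | zero => simp
    | succ i => simpa using ih i

theorem getD_map_length (l : List (List Int)) (j : Nat) :
    (l.map List.length).getD j 0 = (l.getD j []).length := by
  induction l generalizing j with
  | nil => simp
  | cons hd tl ih =>
    cases j with
    | zero => rfl
    | succ j => simpa using ih j

theorem fold_counts (occ : List Int) (n : Nat) (vir : List Int) :
    ∀ (c : Nat) (bl : List (List Int)),
      vir.foldl (countStep occ n) (c, bl.map List.length) =
        ((vir.foldl (binsStep occ n) (c, bl)).1,
         (vir.foldl (binsStep occ n) (c, bl)).2.map List.length) := by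
  induction vir with
  | nil => intro c bl; simp
  | cons a t ih =>
    intro c bl
    simp only [List.foldl_cons, countStep, binsStep]
    rw [← map_length_modify]
    exact ih _ _

theorem signI_mul (a b : Int) : signI a * signI b = signI (a + b) := by
  unfold signI; split_ifs <;> (try norm_num) <;> omega

theorem signI_parity (a b : Int) (h : (a - b) % 2 = 0) : signI a = signI b := by
  unfold signI; split_ifs <;> (try rfl) <;> omega

-- the canonical per-(i1,i2) contribution, in terms of the bin sizes `cnt`
def S2 (base : Int) (e : Nat → Int) (cnt : Nat → Nat) (n j1 : Nat) : List Int :=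
  (List.range' (j1 + 1) (n - j1)).flatMap
    (fun j2 => List.replicate (cnt j2) (base * e j1 * e j2))

def chunk (base : Int) (e : Nat → Int) (cnt : Nat → Nat) (n j1 : Nat) : List Int :=
  (List.range (cnt j1)).reverse.flatMap (fun k => List.replicate k base ++ S2 base e cnt n j1)

def canon (base : Int) (e : Nat → Int) (cnt : Nat → Nat) (n : Nat) : List Int :=
  (List.range (n + 1)).flatMap (chunk base e cnt n)

-- ---- B side ----

theorem foldl_app2 (base : Int) (S : List Int) (l : List Nat) :
    ∀ (out : List Int),
      l.foldl (fun o k => o ++ List.replicate k base ++ S) out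
        = out ++ l.flatMap (fun k => List.replicate k base ++ S) := by
  induction l with
  | nil => intro out; simp
  | cons hd tl ih => intro out; simp [List.flatMap_def]

theorem emit_append (base : Int) (es : List (Nat × Int)) :
    ∀ (p q : List Int), emit base es (p ++ q) = p ++ emit base es q := by
  induction es with
  | nil => intro p q; rfl
  | cons hd rest ih =>
    obtain ⟨c1, e1⟩ := hd
    intro p q
    simp only [emit]
    rw [foldl_app2, foldl_app2, List.append_assoc]
    exact ih p _

theorem emit_eq_flat (base : Int) (es : List (Nat × Int)) (out : List Int) :
    emit base es out = out ++ emit base es [] := by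
  rw [← List.append_nil out, emit_append, List.append_nil]

theorem flatMap_filter_zero (rest : List (Nat × Int)) (g : Nat × Int → Int) :
    (rest.filter (fun ce => ce.1 ≠ 0)).flatMap (fun ce => List.replicate ce.1 (g ce)) =
      rest.flatMap (fun ce => List.replicate ce.1 (g ce)) := by
  induction rest with
  | nil => rfl
  | cons hd tl ih =>
    rw [List.filter_cons]
    by_cases h : hd.1 = 0
    · rw [if_neg (by simp [h]), List.flatMap_cons, ih, h]
      simp
    · rw [if_pos (by simp [h]), List.flatMap_cons, List.flatMap_cons, ih]

theorem emit_skip_zero (base : Int) (es : List (Nat × Int)) :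
    emit base (es.filter (fun ce => ce.1 ≠ 0)) [] = emit base es [] := by
  induction es with
  | nil => rfl
  | cons hd rest ih =>
    obtain ⟨c1, e1⟩ := hd
    by_cases h : c1 = 0
    · subst h
      simp only [List.filter_cons, decide_not, emit]
      simpa using ih
    · have hfilter : (((c1, e1) :: rest).filter (fun ce => ce.1 ≠ 0)) =
          (c1, e1) :: rest.filter (fun ce => ce.1 ≠ 0) := by
        simp [h]
      rw [hfilter]
      simp only [emit]
      rw [flatMap_filter_zero rest (fun ce => base * e1 * ce.2)]
      rw [emit_eq_flat, emit_eq_flat base rest, ih]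

theorem filterMap_if {α β : Type} (l : List α) (p : α → Prop) [DecidablePred p] (h : α → β) :
    l.filterMap (fun x => if p x then some (h x) else none)
      = (l.filter (fun x => decide (p x))).map h := by
  induction l with
  | nil => rfl
  | cons hd tl ih =>
    by_cases hp : p hd
    · simp [hp, ih]
    · simp [hp, ih]

theorem flat_full (base : Int) (e : Nat → Int) (cnt : Nat → Nat) (n : Nat) :
    ∀ (b a : Nat), a + b = n + 1 →
      emit base ((List.range' a b).map (fun j => (cnt j, e j))) [] =
        (List.range' a b).flatMap (chunk base e cnt n) := by
  intro b
  induction b with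
  | zero => intro a _; rfl
  | succ b ih =>
    intro a ha
    rw [List.range'_succ]
    simp only [List.map_cons, emit]
    rw [foldl_app2, List.nil_append, emit_eq_flat, ih (a + 1) (by omega), List.flatMap_cons]
    congr 1
    have hb : n - a = b := by omega
    simp only [chunk, S2, List.flatMap_map, hb]

-- A's j1-loop body, for any bins, equals the canonical contribution
theorem sign2_eq (i1 i2 j1 j2 : Nat) :
    (if ((i1 : Int) + (i2 : Int) - 1 + (j2 : Int) + (j1 : Int) -
        ((if i1 < j2 then 1 else 0) + (if i2 < j2 then 1 else 0) +
         (if i1 < j1 then 1 else 0) + (if i2 < j1 then 1 else 0))) % 2 = 0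
      then (1 : Int) else -1)
    = signI ((i1 : Int) + (i2 : Int) - 1) * gapSign i1 i2 j1 * gapSign i1 i2 j2 := by
  rw [gapSign, gapSign, signI_mul, signI_mul]
  show signI _ = signI _
  congr 1
  ring

theorem sign1_eq (i1 i2 j1 : Nat) :
    (if ((i1 : Int) + (i2 : Int) - 1 + 2 * (j1 : Int)) % 2 = 0 then (1 : Int) else -1)
    = signI ((i1 : Int) + (i2 : Int) - 1) := by
  show signI _ = signI _
  apply signI_parity
  omega

theorem Aj1_eq (bins : List (List Int)) (n i1 i2 : Nat) (out : List Int) :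
    ((List.range (n + 1)).foldl (fun output j1 =>
        if bins.getD j1 [] = [] then output
        else
          (List.range (bins.getD j1 []).length).reverse.foldl (fun output len_j1 =>
            output ++
              List.replicate len_j1
                (if ((i1 : Int) + (i2 : Int) - 1 + 2 * (j1 : Int)) % 2 = 0 then 1 else -1) ++
              (List.range' (j1 + 1) (n + 1 - (j1 + 1))).foldl (fun sj j2 =>
                if bins.getD j2 [] = [] then sj
                else
                  sj ++ List.replicate (bins.getD j2 []).length
                    (if ((i1 : Int) + (i2 : Int) - 1 + (j2 : Int) + (j1 : Int) -
                        ((if i1 < j2 then 1 else 0) + (if i2 < j2 then 1 else 0) +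
                         (if i1 < j1 then 1 else 0) + (if i2 < j1 then 1 else 0))) % 2 = 0
                      then 1 else -1)) [])
            output)
        out)
    = out ++ canon (signI ((i1 : Int) + (i2 : Int) - 1)) (gapSign i1 i2)
        (fun j => (bins.getD j []).length) n := by
  rw [PySem.List.foldl_congr_mem _ _ (fun output j1 =>
        output ++ chunk (signI ((i1 : Int) + (i2 : Int) - 1)) (gapSign i1 i2)
          (fun j => (bins.getD j []).length) n j1) _ ?_]
  · rw [PySem.List.foldl_append_eq_flatMap]; rfl
  · intro acc j1 _
    by_cases hb : bins.getD j1 [] = []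
    · rw [if_pos hb]
      beta_reduce
      simp only [chunk]
      rw [hb]
      simp
    · rw [if_neg hb]
      beta_reduce
      have hsigns : ((List.range' (j1 + 1) (n + 1 - (j1 + 1))).foldl (fun sj j2 =>
            if bins.getD j2 [] = [] then sj
            else
              sj ++ List.replicate (bins.getD j2 []).length
                (if ((i1 : Int) + (i2 : Int) - 1 + (j2 : Int) + (j1 : Int) -
                    ((if i1 < j2 then 1 else 0) + (if i2 < j2 then 1 else 0) +
                     (if i1 < j1 then 1 else 0) + (if i2 < j1 then 1 else 0))) % 2 = 0
                  then 1 else -1)) [])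
          = S2 (signI ((i1 : Int) + (i2 : Int) - 1)) (gapSign i1 i2)
              (fun j => (bins.getD j []).length) n j1 := by
        rw [PySem.List.foldl_congr_mem _ _ (fun sj j2 =>
              sj ++ List.replicate (bins.getD j2 []).length
                (signI ((i1 : Int) + (i2 : Int) - 1) * gapSign i1 i2 j1 * gapSign i1 i2 j2)) _ ?_]
        · rw [PySem.List.foldl_append_eq_flatMap, List.nil_append]
          have h1 : n + 1 - (j1 + 1) = n - j1 := by omega
          rw [h1]; rfl
        · intro acc2 j2 _
          by_cases hb2 : bins.getD j2 [] = []
          · rw [if_pos hb2]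
            beta_reduce
            rw [hb2]
            simp
          · rw [if_neg hb2]
            beta_reduce
            rw [sign2_eq]
      rw [hsigns, sign1_eq, foldl_app2]
      rfl

-- B's per-pair emit equals the canonical contribution
theorem Bpair_eq (counts : List Nat) (n i1 i2 : Nat) (out : List Int) :
    emit (signI ((i1 : Int) + (i2 : Int) - 1))
      (((List.range (n + 1)).filterMap
          (fun j => if counts.getD j 0 ≠ 0 then some (j, counts.getD j 0) else none)).map
        (fun jc => (jc.2, gapSign i1 i2 jc.1))) out
    = out ++ canon (signI ((i1 : Int) + (i2 : Int) - 1)) (gapSign i1 i2)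
        (fun j => counts.getD j 0) n := by
  rw [emit_eq_flat]
  congr 1
  have hes : (((List.range (n + 1)).filterMap
        (fun j => if counts.getD j 0 ≠ 0 then some (j, counts.getD j 0) else none)).map
      (fun jc => (jc.2, gapSign i1 i2 jc.1)))
      = (((List.range (n + 1)).map (fun j => (counts.getD j 0, gapSign i1 i2 j))).filter
          (fun ce => ce.1 ≠ 0)) := by
    rw [filterMap_if (List.range (n + 1)) (fun j => counts.getD j 0 ≠ 0)
        (fun j => (j, counts.getD j 0))]
    rw [List.filter_map]
    simp [Function.comp_def]
  rw [hes, emit_skip_zero]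
  have := flat_full (signI ((i1 : Int) + (i2 : Int) - 1)) (gapSign i1 i2)
      (fun j => counts.getD j 0) n (n + 1) 0 (by omega)
  rw [← List.range_eq_range'] at this
  rw [this]
  rfl

-- ===== VERDICT (by name: the statement is the Claim_ definition above) =====
theorem sign_excite_two_spec : Claim_equal_sign_excite_two := by
  intro occ vir _
  unfold Spec_sign_excite_two
  show sign_excite_two occ vir = sign_excite_two_alt occ vir
  simp only [sign_excite_two, sign_excite_two_alt]
  have hc2 : (vir.foldl (countStep occ occ.length) (0, List.replicate (occ.length + 1) 0)).2 =
      (vir.foldl (binsStep occ occ.length) (0, List.replicate (occ.length + 1) [])).2.map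
        List.length := by
    have := fold_counts occ occ.length vir 0 (List.replicate (occ.length + 1) [])
    simpa using congrArg Prod.snd this
  rw [hc2]
  apply PySem.List.foldl_congr_mem
  intro acc i1 _
  beta_reduce
  apply PySem.List.foldl_congr_mem
  intro acc2 i2 _
  beta_reduce
  rw [Aj1_eq, Bpair_eq]
  simp only [getD_map_length]
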